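-- pv_equiv track=rewrite | github.com/sbarczyk/WDI | Kolokwia/poprawkowe/Kolokwia_inne/21_22/zad_2.py | cztero_zgodne
-- ===== SOURCE A (Python) =====
-- def cztero_zgodne(a,b):
--     digits = [False] * 4
--     while a > 0:
--         digits[a % 4] = True
--         a //= 4
--
--     while b > 0:
--         digits[b % 4] = False
--         b //= 4
--
--
--     for i in range(len(digits)):
--         if digits[i]:
--             return False
--     return True
-- ===== SOURCE B (Python) =====
-- def cztero_zgodne(a, b):
--     def digit_mask(n):
--         # 4-bit integer mask of the base-4 digits of n (empty for n <= 0)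
--         return 0 if n <= 0 else (digit_mask(n // 4) | (1 << (n % 4)))
--
--     def all_covered(n, mask):
--         # early exit: every base-4 digit of n has its bit set in mask
--         return n <= 0 or ((mask >> (n % 4)) & 1 == 1 and all_covered(n // 4, mask))
--
--     return all_covered(a, digit_mask(b))
-- ===== Notes on version B (the rewrite author's own statement) =====
-- stated objective: alternative
-- what changed: B recursively builds a 4-bit integer bitmask of b's base-4 digits and then recursively checks a's digits against it with early exit (short-circuit 'or'/'and'), instead of A's shared 4-slot boolean array toggled True by a's loop and False by b's loop followed by a survivor scan.
import Mathlib
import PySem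

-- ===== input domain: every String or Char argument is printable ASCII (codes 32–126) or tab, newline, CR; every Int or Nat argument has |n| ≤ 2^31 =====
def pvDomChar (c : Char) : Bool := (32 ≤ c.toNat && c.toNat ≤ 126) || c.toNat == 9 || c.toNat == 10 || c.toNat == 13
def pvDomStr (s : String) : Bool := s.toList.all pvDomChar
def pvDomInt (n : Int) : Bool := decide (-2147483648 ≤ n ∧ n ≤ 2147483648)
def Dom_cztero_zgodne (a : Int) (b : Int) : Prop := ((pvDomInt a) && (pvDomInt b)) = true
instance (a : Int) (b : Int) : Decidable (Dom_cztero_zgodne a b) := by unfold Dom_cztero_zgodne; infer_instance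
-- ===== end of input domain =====

-- B builds a 4-bit integer bitmask of b's base-4 digits recursively and recursively
-- checks a's digits against it with early exit, replacing A's shared toggled boolean
-- array and survivor scan (objective: alternative).


-- ===== PORT A =====
-- termination helper for the while loops (cited by name in decreasing_by)
theorem czFdivLt (x : Int) (h : 0 < x) : PySem.Int.floordiv x 4 < x := by
  have h1 : Int.fdiv x 4 = x / 4 := Int.fdiv_eq_ediv_of_nonneg x (by omega)
  have h2 : x / 4 < x := by omega
  simpa [PySem.Int.floordiv, h1] using h2

-- first while loop: digits[a % 4] = True; a //= 4   (a > 0 so a % 4 is in range; pySetD is exact there)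
def czA_loopT (a : Int) (digits : List Bool) : List Bool :=
  if a > 0 then
    czA_loopT (PySem.Int.floordiv a 4) (PySem.List.pySetD digits (PySem.Int.mod a 4) true)
  else digits
termination_by a.toNat
decreasing_by
  have h4 : PySem.Int.floordiv a 4 < a := czFdivLt a (by omega)
  omega

-- second while loop: digits[b % 4] = False; b //= 4
def czA_loopF (b : Int) (digits : List Bool) : List Bool :=
  if b > 0 then
    czA_loopF (PySem.Int.floordiv b 4) (PySem.List.pySetD digits (PySem.Int.mod b 4) false)
  else digits
termination_by b.toNat
decreasing_by
  have h4 : PySem.Int.floordiv b 4 < b := czFdivLt b (by omega)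
  omega

-- final scan: for i in range(len(digits)): if digits[i]: return False / return True
def czA_scan (digits : List Bool) : Bool :=
  match digits with
  | [] => true
  | d :: rest => if d then false else czA_scan rest

def cztero_zgodne (a : Int) (b : Int) : Bool :=
  czA_scan (czA_loopF b (czA_loopT a [false, false, false, false]))

-- ===== PORT B =====
-- digit_mask(n): 0 if n <= 0 else digit_mask(n // 4) | (1 << (n % 4))
-- the mask and all shifted amounts are nonnegative, so Nat bit operations are exact here
def czB_digitMask (n : Int) : Nat :=
  if n ≤ 0 then 0
  else czB_digitMask (PySem.Int.floordiv n 4) ||| (1 <<< (PySem.Int.mod n 4).toNat)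
termination_by n.toNat
decreasing_by
  have h4 : PySem.Int.floordiv n 4 < n := czFdivLt n (by omega)
  omega

-- all_covered(n, mask): n <= 0 or ((mask >> (n % 4)) & 1 == 1 and all_covered(n // 4, mask))
def czB_allCovered (n : Int) (mask : Nat) : Bool :=
  if n ≤ 0 then true
  else ((mask >>> (PySem.Int.mod n 4).toNat) &&& 1 == 1)
       && czB_allCovered (PySem.Int.floordiv n 4) mask
termination_by n.toNat
decreasing_by
  have h4 : PySem.Int.floordiv n 4 < n := czFdivLt n (by omega)
  omega

def cztero_zgodne_alt (a : Int) (b : Int) : Bool :=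
  czB_allCovered a (czB_digitMask b)

-- ===== PRECONDITION & SPEC =====
def Spec_cztero_zgodne (a : Int) (b : Int) (out : Bool) : Prop := out = cztero_zgodne_alt a b
instance (a : Int) (b : Int) (out : Bool) : Decidable (Spec_cztero_zgodne a b out) := by unfold Spec_cztero_zgodne; infer_instance

-- ===== CLAIM (what is proved, stated in full; the proofs are below) =====
def Claim_equal_cztero_zgodne : Prop := ∀ (a : Int) (b : Int), Dom_cztero_zgodne a b → Spec_cztero_zgodne a b (cztero_zgodne a b)

-- ===== LEMMAS AND PROOFS =====

-- the base-4 digit predicate shared by both correctness characterisations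
def czDig (x : Int) (d : Int) : Bool :=
  if x > 0 then (d == PySem.Int.mod x 4 || czDig (PySem.Int.floordiv x 4) d) else false
termination_by x.toNat
decreasing_by
  have h4 : PySem.Int.floordiv x 4 < x := czFdivLt x (by omega)
  omega

theorem czDig_pos (x d : Int) (h : x > 0) :
    czDig x d = (d == PySem.Int.mod x 4 || czDig (PySem.Int.floordiv x 4) d) := by
  conv_lhs => rw [czDig]
  simp [h]

theorem czDig_nonpos (x d : Int) (h : ¬ x > 0) : czDig x d = false := by
  conv_lhs => rw [czDig]
  simp [h]

theorem czDig_range (x d : Int) : czDig x d = true → 0 ≤ d ∧ d < 4 := by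
  fun_induction czDig x d with
  | case1 x hx ih =>
    intro h
    simp only [Bool.or_eq_true, beq_iff_eq] at h
    rcases h with h1 | h1
    · subst h1
      rw [PySem.Int.mod_eq_emod_of_pos (by norm_num)]
      have := Int.emod_nonneg x (by norm_num : (4:Int) ≠ 0)
      have := Int.emod_lt_of_pos x (by norm_num : (0:Int) < 4)
      omega
    · exact ih h1
  | case2 x hx => intro h; exact absurd h (by simp)

theorem czMod_bounds (n : Int) : 0 ≤ PySem.Int.mod n 4 ∧ PySem.Int.mod n 4 < 4 := by
  rw [PySem.Int.mod_eq_emod_of_pos (by norm_num)]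
  have := Int.emod_nonneg n (by norm_num : (4:Int) ≠ 0)
  have := Int.emod_lt_of_pos n (by norm_num : (0:Int) < 4)
  omega

-- (mask >> d) & 1 == 1 is exactly testBit
theorem czShiftTest (m d : Nat) : ((m >>> d) &&& 1 == 1) = m.testBit d := by
  rw [Nat.testBit_eq_decide_div_mod_eq, Nat.shiftRight_eq_div_pow, Nat.and_one_is_mod]
  by_cases h : m / 2 ^ d % 2 = 1 <;> simp [h]

theorem czB_mask_testBit (b : Int) (d : Nat) :
    (czB_digitMask b).testBit d = czDig b (d : Int) := by
  fun_induction czB_digitMask b with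
  | case1 n hn =>
    rw [czDig_nonpos n _ (by omega)]
    simp
  | case2 n hn ih =>
    rw [czDig_pos n _ (by omega), Nat.testBit_or, ih, Nat.shiftLeft_eq, one_mul,
        Nat.testBit_two_pow]
    have hm := czMod_bounds n
    have key : (decide ((PySem.Int.mod n 4).toNat = d)) = ((d : Int) == PySem.Int.mod n 4) := by
      rw [Bool.eq_iff_iff]
      simp only [decide_eq_true_eq, beq_iff_eq]
      omega
    rw [key]
    exact Bool.or_comm _ _

theorem czB_allCovered_iff (n : Int) (mask : Nat) :
    czB_allCovered n mask = true ↔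
      ∀ x : Int, czDig n x = true → mask.testBit x.toNat = true := by
  fun_induction czB_allCovered n mask with
  | case1 n hn =>
    constructor
    · intro _ x hx
      rw [czDig_nonpos n x (by omega)] at hx
      exact absurd hx (by simp)
    · intro _
      rfl
  | case2 n hn ih =>
    rw [Bool.and_eq_true, ih, czShiftTest]
    constructor
    · rintro ⟨h1, h2⟩ x hx
      rw [czDig_pos n x (by omega)] at hx
      rcases Bool.or_eq_true_iff.mp hx with h | h
      · have hx' : x = PySem.Int.mod n 4 := by exact_mod_cast beq_iff_eq.mp h
        rw [hx']
        exact h1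
      · exact h2 x h
    · intro h
      have hm := czMod_bounds n
      refine ⟨?_, fun x hx => h x ?_⟩
      · have := h (PySem.Int.mod n 4) (by rw [czDig_pos n _ (by omega)]; simp)
        exact this
      · rw [czDig_pos n x (by omega), hx]; simp

theorem czB_iff (a b : Int) :
    cztero_zgodne_alt a b = true ↔
      ∀ x : Int, czDig a x = true → czDig b x = true := by
  unfold cztero_zgodne_alt
  rw [czB_allCovered_iff]
  constructor
  · intro h x hx
    have hr := czDig_range a x hx
    have := h x hx
    rw [czB_mask_testBit] at this
    rwa [show ((x.toNat : Int)) = x by omega] at this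
  · intro h x hx
    have hr := czDig_range a x hx
    rw [czB_mask_testBit, show ((x.toNat : Int)) = x by omega]
    exact h x hx

-- A-side: value of each final slot of A's array, and A's scan characterised over indices
theorem czA_loopT_getD (a : Int) (digits : List Bool) (h : digits.length = 4)
    (i : Int) (hi : 0 ≤ i ∧ i < 4) :
    PySem.List.pyGetD (czA_loopT a digits) i false =
      (PySem.List.pyGetD digits i false || czDig a i) := by
  fun_induction czA_loopT a digits with
  | case1 a digits ha ih =>
    have hm := czMod_bounds a
    have hcast : PySem.Int.mod a 4 = ((PySem.Int.mod a 4).toNat : Int) := by omega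
    have hlen' : (PySem.List.pySetD digits (PySem.Int.mod a 4) true).length = 4 := by
      rw [PySem.List.length_pySetD]; exact h
    rw [ih hlen', czDig_pos a i ha]
    have hicast : i = (i.toNat : Int) := by omega
    rw [hcast, hicast,
      PySem.List.pyGetD_pySetD_natCast digits (PySem.Int.mod a 4).toNat i.toNat true false
        (by omega)]
    by_cases hieq : i.toNat = (PySem.Int.mod a 4).toNat
    · simp [hieq]
    · have h1 : ((i.toNat : Int) == ((PySem.Int.mod a 4).toNat : Int)) = false := by
        simp only [beq_eq_false_iff_ne, ne_eq, Int.natCast_inj]; exact hieq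
      rw [if_neg hieq, h1, Bool.false_or]
  | case2 a digits ha =>
    rw [czDig_nonpos a i ha]
    simp

theorem czA_loopF_getD (b : Int) (digits : List Bool) (h : digits.length = 4)
    (i : Int) (hi : 0 ≤ i ∧ i < 4) :
    PySem.List.pyGetD (czA_loopF b digits) i false =
      (PySem.List.pyGetD digits i false && !czDig b i) := by
  fun_induction czA_loopF b digits with
  | case1 b digits hb ih =>
    have hm := czMod_bounds b
    have hcast : PySem.Int.mod b 4 = ((PySem.Int.mod b 4).toNat : Int) := by omega
    have hlen' : (PySem.List.pySetD digits (PySem.Int.mod b 4) false).length = 4 := by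
      rw [PySem.List.length_pySetD]; exact h
    rw [ih hlen', czDig_pos b i hb]
    have hicast : i = (i.toNat : Int) := by omega
    rw [hcast, hicast,
      PySem.List.pyGetD_pySetD_natCast digits (PySem.Int.mod b 4).toNat i.toNat false false
        (by omega)]
    by_cases hieq : i.toNat = (PySem.Int.mod b 4).toNat
    · simp [hieq]
    · have h1 : ((i.toNat : Int) == ((PySem.Int.mod b 4).toNat : Int)) = false := by
        simp only [beq_eq_false_iff_ne, ne_eq, Int.natCast_inj]; exact hieq
      rw [if_neg hieq, h1, Bool.false_or]
  | case2 b digits hb =>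
    rw [czDig_nonpos b i hb]
    simp

theorem czA_loop_length_T (a : Int) (digits : List Bool) :
    (czA_loopT a digits).length = digits.length := by
  fun_induction czA_loopT a digits with
  | case1 a digits ha ih => rw [ih, PySem.List.length_pySetD]
  | case2 a digits ha => rfl

theorem czA_loop_length_F (b : Int) (digits : List Bool) :
    (czA_loopF b digits).length = digits.length := by
  fun_induction czA_loopF b digits with
  | case1 b digits hb ih => rw [ih, PySem.List.length_pySetD]
  | case2 b digits hb => rfl

theorem czA_scan_iff (digits : List Bool) :
    czA_scan digits = true ↔ ∀ d ∈ digits, d = false := by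
  induction digits with
  | nil => simp [czA_scan]
  | cons d rest ih =>
    cases d <;> simp [czA_scan, ih]

theorem czA_slot (a b : Int) (i : Int) (hi : 0 ≤ i ∧ i < 4) :
    PySem.List.pyGetD (czA_loopF b (czA_loopT a [false, false, false, false])) i false =
      (czDig a i && !czDig b i) := by
  have hlT : (czA_loopT a [false, false, false, false]).length = 4 := by
    rw [czA_loop_length_T]; rfl
  rw [czA_loopF_getD b _ hlT i hi, czA_loopT_getD a _ rfl i hi]
  have h0 : PySem.List.pyGetD [false, false, false, false] i false = false := by
    have : i = 0 ∨ i = 1 ∨ i = 2 ∨ i = 3 := by omega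
    rcases this with h | h | h | h <;> subst h <;> decide
  rw [h0, Bool.false_or]

theorem czA_iff (a b : Int) :
    cztero_zgodne a b = true ↔
      ∀ i : Int, 0 ≤ i → i < 4 → czDig a i = true → czDig b i = true := by
  unfold cztero_zgodne
  rw [czA_scan_iff]
  have hlen : (czA_loopF b (czA_loopT a [false, false, false, false])).length = 4 := by
    rw [czA_loop_length_F, czA_loop_length_T]; rfl
  constructor
  · intro h i h0 h4 hda
    have hn : i.toNat < (czA_loopF b (czA_loopT a [false, false, false, false])).length := by
      omega
    have hmem := List.getElem_mem hn
    have hv := h _ hmem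
    have hget : PySem.List.pyGetD (czA_loopF b (czA_loopT a [false, false, false, false]))
        ((i.toNat : Nat) : Int) false
        = (czA_loopF b (czA_loopT a [false, false, false, false]))[i.toNat] := by
      rw [PySem.List.pyGetD_natCast, List.getD_eq_getElem _ _ hn]
    have hslot := czA_slot a b i ⟨h0, h4⟩
    rw [show i = ((i.toNat : Nat) : Int) by omega, hget, hv] at hslot
    cases hdb : czDig b i
    · rw [show ((i.toNat : Nat) : Int) = i by omega] at hslot
      rw [hda, hdb] at hslot
      simp at hslot
    · rfl
  · intro h d hd
    rcases List.getElem_of_mem hd with ⟨n, hn, hdn⟩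
    have hn4 : n < 4 := by omega
    have hget : PySem.List.pyGetD (czA_loopF b (czA_loopT a [false, false, false, false]))
        ((n : Nat) : Int) false = d := by
      rw [PySem.List.pyGetD_natCast, List.getD_eq_getElem _ _ hn, hdn]
    have hslot := czA_slot a b (n : Int) ⟨by omega, by omega⟩
    rw [hget] at hslot
    cases hda : czDig a (n : Int)
    · rw [hda] at hslot; simpa using hslot.symm
    · have hdb := h (n : Int) (by omega) (by omega) hda
      rw [hda, hdb] at hslot; simpa using hslot.symm

-- ===== VERDICT (by name: the statement is the Claim_ definition above) =====
theorem cztero_zgodne_spec : Claim_equal_cztero_zgodne := by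
  intro a b _
  unfold Spec_cztero_zgodne
  rw [Bool.eq_iff_iff, czA_iff, czB_iff]
  constructor
  · intro h x hx
    have := czDig_range a x hx
    exact h x (by omega) (by omega) hx
  · intro h i _ _ hi
    exact h i hi
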